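-- pv_equiv track=rewrite | github.com/Asbelll/adventcode | 01-12-2023/teste.py | find
-- ===== SOURCE A (Python) =====
-- DICT = {
--     "one": 1,
--     "two": 2,
--     "three": 3,
--     "four": 4,
--     "five": 5,
--     "six": 6,
--     "seven": 7,
--     "eight": 8,
--     "nine": 9,
--     "1": 1,
--     "2": 2,
--     "3": 3,
--     "4": 4,
--     "5": 5,
--     "6": 6,
--     "7": 7,
--     "8": 8,
--     "9": 9
-- }
--
-- def find(line):
--     index = []
--     for num in DICT:
--         count = 0
--         number = ""
--         while count < len(line):
--             if line.find(num, count) == number: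
--                 count += 1
--                 continue
--             if line.find(num, count) != -1:
--                 index.append(line.find(num, count))
--                 number = line.find(num, count)
--             count += 1
--     index.sort()
--     return index
-- ===== SOURCE B (Python) =====
-- KEYS = ("one", "two", "three", "four", "five", "six", "seven", "eight", "nine",
--         "1", "2", "3", "4", "5", "6", "7", "8", "9")
--
--
-- def find(line):
--     # One left-to-right pass: position i is a hit iff some key starts at i.
--     # No key is a prefix of another, so each position is counted at most once,
--     # and the result comes out already sorted.
--     return [i for i in range(len(line))
--             if any(line.startswith(k, i) for k in KEYS)]
-- ===== Notes on version B (the rewrite author's own statement) =====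
-- stated objective: faster
-- what changed: Replaces the per-key while-loop that re-runs line.find from every position (and a final sort) with a single left-to-right pass that tests each position for a key prefix, emitting indices already in order.
import Mathlib
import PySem

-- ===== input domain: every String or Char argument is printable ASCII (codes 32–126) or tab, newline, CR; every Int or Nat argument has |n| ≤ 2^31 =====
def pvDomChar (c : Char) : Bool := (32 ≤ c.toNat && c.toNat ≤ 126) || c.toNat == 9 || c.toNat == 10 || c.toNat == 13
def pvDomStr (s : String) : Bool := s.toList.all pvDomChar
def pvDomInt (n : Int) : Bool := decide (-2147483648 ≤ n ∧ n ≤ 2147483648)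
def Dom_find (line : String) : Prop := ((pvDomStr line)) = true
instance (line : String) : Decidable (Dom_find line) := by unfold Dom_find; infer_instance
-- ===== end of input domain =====

-- B replaces A's per-key while-loop of repeated line.find calls (plus a final sort)
-- by one left-to-right pass testing each position for a key prefix; objective: faster.

-- ===== PORT A =====
-- the keys of DICT, in insertion order (only the keys drive the result)
def pvDictKeys : List String :=
  ["one", "two", "three", "four", "five", "six", "seven", "eight", "nine",
   "1", "2", "3", "4", "5", "6", "7", "8", "9"]

-- one iteration of A's 'while count < len(line)' body; number is "" initially, an int
-- after the first append: modelled as Option Int (the '== number' test is False on "").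
def findStep (cs num : List Char) (st : List Int × Option Int) (count : Int) :
    List Int × Option Int :=
  let f := PySem.Chars.findFrom cs num count
  if some f = st.2 then st
  else if f ≠ -1 then (st.1 ++ [f], some f)
  else st

def find (line : String) : List Int :=
  let cs := line.toList
  let index := pvDictKeys.foldl
    (fun index num =>
      ((PySem.List.pyRange 0 (PySem.Str.len line) 1).foldl (findStep cs num.toList)
        (index, (none : Option Int))).1)
    []
  PySem.List.sorted index (fun x => x) false

-- ===== PORT B =====
def pvKEYS : List String :=
  ["one", "two", "three", "four", "five", "six", "seven", "eight", "nine",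
   "1", "2", "3", "4", "5", "6", "7", "8", "9"]

-- line.startswith(k, i) for 0 ≤ i < len(line) is exactly: k is a prefix of line[i:]
def find_alt (line : String) : List Int :=
  (PySem.List.pyRange 0 (PySem.Str.len line) 1).filter
    (fun i => pvKEYS.any (fun k => PySem.Chars.startswith (line.toList.drop i.toNat) k.toList))

-- ===== PRECONDITION & SPEC =====
def Spec_find (line : String) (out : List Int) : Prop := out = find_alt line
instance (line : String) (out : List Int) : Decidable (Spec_find line out) := by unfold Spec_find; infer_instance

-- ===== CLAIM (what is proved, stated in full; the proofs are below) =====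
def Claim_equal_find : Prop := ∀ (line : String), Dom_find line → Spec_find line (find line)

-- ===== LEMMAS AND PROOFS =====

-- occurrence test: key w starts at (nonnegative) position i of cs
def pvOcc (cs w : List Char) (i : Int) : Bool :=
  PySem.Chars.startswith (cs.drop i.toNat) w

-- the ordered list of occurrence positions of w in cs at positions ≥ c
def pvOFrom (cs w : List Char) (c : Int) : List Int :=
  (PySem.List.pyRange c cs.length 1).filter (pvOcc cs w)

lemma pvOcc_iff (cs w : List Char) (i : Int) :
    pvOcc cs w i = true ↔ w <+: cs.drop i.toNat := by
  simp [pvOcc, PySem.Chars.startswith_iff]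

lemma pvOcc_lt (cs w : List Char) (hw : w ≠ []) (p : Nat) (h : w <+: cs.drop p) :
    p < cs.length := by
  by_contra hge
  rw [List.drop_eq_nil_of_le (by omega)] at h
  exact hw (List.prefix_nil.mp h)

lemma pvOFrom_nil (cs w : List Char) (c : Int) (h : (cs.length : Int) ≤ c) :
    pvOFrom cs w c = [] := by
  simp [pvOFrom, PySem.List.pyRange_one_eq_nil h]

lemma pvOFrom_cons (cs w : List Char) (c : Int) (h : c < (cs.length : Int)) :
    pvOFrom cs w c =
      (if pvOcc cs w c then [c] else []) ++ pvOFrom cs w (c + 1) := by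
  rw [pvOFrom, PySem.List.pyRange_one_cons h, List.filter_cons]
  split_ifs <;> simp [pvOFrom]

lemma pvOFrom_mem (cs w : List Char) (c x : Int) (hx : x ∈ pvOFrom cs w c) :
    c ≤ x ∧ x < (cs.length : Int) ∧ pvOcc cs w x = true := by
  rw [pvOFrom, List.mem_filter] at hx
  rcases hx with ⟨hr, ho⟩
  rw [PySem.List.mem_pyRange_one] at hr
  exact ⟨hr.1, hr.2, ho⟩

-- if p is the first occurrence at or after c, pvOFrom c starts with p
lemma pvOFrom_head (cs w : List Char) (p : Nat) (hp : w <+: cs.drop p) (hpl : p < cs.length) :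
    ∀ (m c : Nat), c ≤ p → p - c = m →
      (∀ t : Nat, c ≤ t → t < p → ¬ w <+: cs.drop t) →
      pvOFrom cs w c = (p : Int) :: pvOFrom cs w ((p : Int) + 1) := by
  intro m
  induction m with
  | zero =>
    intro c hcp hm _
    have : c = p := by omega
    subst this
    rw [pvOFrom_cons cs w c (by exact_mod_cast hpl)]
    have : pvOcc cs w c = true := by
      rw [pvOcc_iff]; simpa using hp
    simp [this]
  | succ m ih =>
    intro c hcp hm hno
    have hcl : (c : Int) < (cs.length : Int) := by exact_mod_cast Nat.lt_of_le_of_lt hcp hpl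
    rw [pvOFrom_cons cs w c hcl]
    have hocc : pvOcc cs w (c : Int) = false := by
      rw [Bool.eq_false_iff, Ne, pvOcc_iff]
      intro h
      exact hno c le_rfl (by omega) (by simpa using h)
    have : ((c : Int) + 1) = ((c + 1 : Nat) : Int) := by push_cast; ring
    rw [hocc, this]
    simpa using ih (c + 1) (by omega) (by omega) (fun t ht1 ht2 => hno t (by omega) ht2)

-- invariant carried by A's inner loop: the current 'number'
def pvInv (cs w : List Char) (c : Nat) (q : Option Int) : Prop :=
  match q with
  | none => ∀ p : Nat, w <+: cs.drop p → c ≤ p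
  | some pI => ∃ p : Nat, pI = (p : Int) ∧ w <+: cs.drop p ∧
      ∀ t : Nat, w <+: cs.drop t → c ≤ t → p ≤ t

lemma pvFilter_triv (q : Option Int) (l : List Int) (h : ∀ x ∈ l, some x ≠ q) :
    l.filter (fun x => decide (some x ≠ q)) = l :=
  List.filter_eq_self.mpr (fun x hx => by simpa using h x hx)

-- disjoint filters commute with 'or'
lemma pvFilterOrPerm {α : Type} (p q : α → Bool) (xs : List α)
    (h : ∀ x ∈ xs, ¬(p x = true ∧ q x = true)) :
    (xs.filter (fun x => p x || q x)).Perm (xs.filter p ++ xs.filter q) := by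
  induction xs with
  | nil => simp
  | cons a t ih =>
    have hrest := ih (fun x hx => h x (List.mem_cons_of_mem a hx))
    by_cases hp : p a = true
    · have hq : q a = false := by
        rcases Bool.eq_false_or_eq_true (q a) with h' | h'
        · exact absurd ⟨hp, h'⟩ (h a (List.mem_cons_self))
        · exact h'
      simpa [List.filter_cons, hp, hq] using hrest.cons a
    · have hp' : p a = false := by simpa using hp
      by_cases hq : q a = true
      · simp only [List.filter_cons, hp', hq, Bool.false_or]
        exact (hrest.cons a).trans (List.Perm.symm (List.perm_middle))
      · have hq' : q a = false := by simpa using hq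
        simpa [List.filter_cons, hp', hq'] using hrest

-- no key of DICT is a prefix of another
lemma pvKeysNoPrefix :
    ∀ k1 ∈ pvDictKeys, ∀ k2 ∈ pvDictKeys, k1.toList <+: k2.toList → k1 = k2 := by
  decide

-- a position matches at most one key
lemma pvDisjoint (cs : List Char) (x : Int) :
    ∀ k1 ∈ pvDictKeys, ∀ k2 ∈ pvDictKeys,
      pvOcc cs k1.toList x = true → pvOcc cs k2.toList x = true → k1 = k2 := by
  intro k1 h1 k2 h2 ho1 ho2
  rw [pvOcc_iff] at ho1 ho2
  rcases List.prefix_or_prefix_of_prefix ho1 ho2 with h | h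
  · exact pvKeysNoPrefix k1 h1 k2 h2 h
  · exact (pvKeysNoPrefix k2 h2 k1 h1 h).symm

lemma pvFlatMapPerm (cs : List Char) (xs : List Int) :
    ∀ (ks : List String), ks.Nodup →
      (∀ x ∈ xs, ∀ k1 ∈ ks, ∀ k2 ∈ ks,
        pvOcc cs k1.toList x = true → pvOcc cs k2.toList x = true → k1 = k2) →
      (xs.filter (fun i => ks.any (fun k => pvOcc cs k.toList i))).Perm
        (ks.flatMap (fun k => xs.filter (pvOcc cs k.toList))) := by
  intro ks
  induction ks with
  | nil => simp
  | cons k t ih =>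
    intro hnd hdisj
    have hdisj' : ∀ x ∈ xs, ∀ k1 ∈ t, ∀ k2 ∈ t,
        pvOcc cs k1.toList x = true → pvOcc cs k2.toList x = true → k1 = k2 :=
      fun x hx k1 h1 k2 h2 => hdisj x hx k1 (List.mem_cons_of_mem k h1) k2 (List.mem_cons_of_mem k h2)
    have hstep : (xs.filter (fun i => pvOcc cs k.toList i || t.any (fun k' => pvOcc cs k'.toList i))).Perm
        (xs.filter (pvOcc cs k.toList) ++ xs.filter (fun i => t.any (fun k' => pvOcc cs k'.toList i))) := by
      apply pvFilterOrPerm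
      intro x hx ⟨hk, ht⟩
      rcases List.any_eq_true.mp ht with ⟨k', hk', ho'⟩
      have : k = k' := hdisj x hx k List.mem_cons_self k' (List.mem_cons_of_mem k hk') hk ho'
      exact (List.nodup_cons.mp hnd).1 (this ▸ hk')
    have := hstep.trans ((ih (List.nodup_cons.mp hnd).2 hdisj').append_left (xs.filter (pvOcc cs k.toList)))
    simpa [List.flatMap_cons] using this

-- occurrences at or after a negative find result: none
lemma pvNoOcc (cs w : List Char) (c : Nat) (hk : c ≤ cs.length)
    (hneg : PySem.Chars.findFrom cs w (c : Int) = -1) :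
    ∀ p : Nat, c ≤ p → ¬ w <+: cs.drop p := by
  intro p hcp hpre
  apply (PySem.Chars.findFrom_natCast_eq_neg_one_iff cs w c hk).mp hneg
  rw [← PySem.Chars.isIn_iff_infix]
  rw [← PySem.Chars.exists_prefix_drop_iff_isIn]
  exact ⟨p - c, by rwa [List.drop_drop, Nat.add_sub_cancel' hcp]⟩

-- elements of pvOFrom k never equal a value below k
lemma pvFilter_ofrom (cs w : List Char) (k : Int) (f : Int) (hf : f < k) :
    (pvOFrom cs w k).filter (fun x => decide (some x ≠ some f)) = pvOFrom cs w k := by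
  apply pvFilter_triv
  intro x hx h
  obtain ⟨hkx, _, _⟩ := pvOFrom_mem cs w k x hx
  cases h
  omega

-- the core characterisation of A's inner while-loop
lemma pvKeyLoop (cs w : List Char) (hw : w ≠ []) :
    ∀ (m c : Nat), c ≤ cs.length → cs.length - c = m →
      ∀ (acc : List Int) (q : Option Int), pvInv cs w c q →
      ((PySem.List.pyRange (c : Int) (cs.length : Int) 1).foldl (findStep cs w) (acc, q)).1 =
        acc ++ (pvOFrom cs w (c : Int)).filter (fun x => decide (some x ≠ q)) := by
  intro m
  induction m with
  | zero =>
    intro c hc hm acc q _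
    have h1 : (cs.length : Int) ≤ (c : Int) := by exact_mod_cast Nat.le_of_sub_eq_zero hm
    rw [PySem.List.pyRange_one_eq_nil h1, pvOFrom_nil cs w _ h1]
    simp
  | succ m ih =>
    intro c hc hm acc q hinv
    have hcl : c < cs.length := by omega
    have hclI : (c : Int) < (cs.length : Int) := by exact_mod_cast hcl
    have hc1 : ((c : Int) + 1) = ((c + 1 : Nat) : Int) := by push_cast; ring
    rw [PySem.List.pyRange_one_cons hclI, List.foldl_cons]
    by_cases h1 : some (PySem.Chars.findFrom cs w (c : Int)) = q
    · -- Python: line.find(num, count) == number — skip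
      have hstep : findStep cs w (acc, q) (c : Int) = (acc, q) := by
        simp [findStep, h1]
      rw [hstep, hc1]
      have hinv2 : ∃ p : Nat, PySem.Chars.findFrom cs w (c : Int) = (p : Int) ∧
          w <+: cs.drop p ∧ ∀ t : Nat, w <+: cs.drop t → c ≤ t → p ≤ t := by
        rw [← h1] at hinv
        exact hinv
      obtain ⟨p, hpq, hoccp, hminp⟩ := hinv2
      have hinv' : pvInv cs w (c + 1) q := by
        rw [← h1]
        exact ⟨p, hpq, hoccp, fun t ht hct => hminp t ht (by omega)⟩
      rw [ih (c + 1) (by omega) (by omega) acc q hinv']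
      -- list bookkeeping: filter (≠ q) is the same on pvOFrom c and pvOFrom (c+1)
      congr 1
      rw [pvOFrom_cons cs w (c : Int) hclI, hc1]
      by_cases hoc : pvOcc cs w (c : Int) = true
      · -- an occurrence at c: then find result is exactly c and is filtered out
        have hne : PySem.Chars.findFrom cs w (c : Int) ≠ -1 := by
          rw [hpq]
          omega
        obtain ⟨hcf, hpre, hmin⟩ := PySem.Chars.findFrom_natCast_spec cs w c hc hne
        have hoccc : w <+: cs.drop c := by
          rw [pvOcc_iff] at hoc
          simpa using hoc
        have hfc : PySem.Chars.findFrom cs w (c : Int) = (c : Int) := by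
          by_contra hne2
          exact hmin c le_rfl (by omega) hoccc
        rw [← h1, hfc]
        simp [hoc]
      · simp only [Bool.not_eq_true] at hoc
        rw [hoc]
        simp
    · by_cases h2 : PySem.Chars.findFrom cs w (c : Int) = -1
      · -- find returned -1: no occurrence at or after c; state unchanged
        have hstep : findStep cs w (acc, q) (c : Int) = (acc, q) := by
          simp [findStep, h2]
        have hno := pvNoOcc cs w c hc h2
        have hinv' : pvInv cs w (c + 1) q := by
          cases q with
          | none => exact fun p hp => absurd hp (hno p (hinv p hp))
          | some pI =>
            obtain ⟨p, hpq, hoccp, hminp⟩ := hinv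
            exact ⟨p, hpq, hoccp, fun t ht hct => hminp t ht (by omega)⟩
        rw [hstep, hc1, ih (c + 1) (by omega) (by omega) acc q hinv']
        congr 1
        rw [pvOFrom_cons cs w (c : Int) hclI, hc1]
        have hoc : pvOcc cs w (c : Int) = false := by
          rw [Bool.eq_false_iff, Ne, pvOcc_iff]
          intro h
          exact hno c le_rfl (by simpa using h)
        rw [hoc]
        simp
      · -- append branch
        have hstep : findStep cs w (acc, q) (c : Int) =
            (acc ++ [PySem.Chars.findFrom cs w (c : Int)],
             some (PySem.Chars.findFrom cs w (c : Int))) := by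
          simp [findStep, h1, h2]
        obtain ⟨hcf, hpre, hmin⟩ := PySem.Chars.findFrom_natCast_spec cs w c hc h2
        set f := PySem.Chars.findFrom cs w (c : Int) with hfdef
        have hf0 : (0 : Int) ≤ f := le_trans (by exact_mod_cast Nat.zero_le c) hcf
        have hfnat : f = (f.toNat : Int) := (Int.toNat_of_nonneg hf0).symm
        have hfl : f.toNat < cs.length := pvOcc_lt cs w hw f.toNat hpre
        have hcfn : c ≤ f.toNat := by omega
        have hinv' : pvInv cs w (c + 1) (some f) := by
          refine ⟨f.toNat, hfnat, hpre, fun t ht hct => ?_⟩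
          by_contra hlt
          exact hmin t (by omega) (by omega) ht
        rw [hstep, hc1, ih (c + 1) (by omega) (by omega) _ _ hinv']
        -- the old 'number' q filters away nothing from pvOFrom c
        have htriv : (pvOFrom cs w (c : Int)).filter (fun x => decide (some x ≠ q)) =
            pvOFrom cs w (c : Int) := by
          apply pvFilter_triv
          intro x hx hxq
          obtain ⟨hcx, hxl, hoccx⟩ := pvOFrom_mem cs w (c : Int) x hx
          cases q with
          | none => simp at hxq
          | some pI =>
            obtain ⟨pq, hpq, hoccq, hminq⟩ := hinv
            have hxpq : x = (pq : Int) := by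
              cases hxq
              exact hpq
            have hxnat : x = (x.toNat : Int) := by omega
            have hoccx' : w <+: cs.drop x.toNat := by
              rw [pvOcc_iff] at hoccx
              exact hoccx
            have h1' : f.toNat ≤ x.toNat := by
              by_contra hlt
              exact hmin x.toNat (by omega) (by omega) hoccx'
            have h2' : pq ≤ f.toNat := hminq f.toNat hpre (by omega)
            have : x = f := by omega
            apply h1
            rw [← hxq, this]
        rw [htriv]
        have hhead : pvOFrom cs w (c : Int) =
            (f.toNat : Int) :: pvOFrom cs w ((f.toNat : Int) + 1) :=
          pvOFrom_head cs w f.toNat hpre hfl (f.toNat - c) c hcfn rfl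
            (fun t ht1 ht2 => hmin t ht1 ht2)
        by_cases hfc : f.toNat = c
        · -- find found an occurrence at c itself
          have : pvOFrom cs w ((c : Int) + 1) = pvOFrom cs w ((f.toNat : Int) + 1) := by
            rw [hfc]
          rw [hc1] at this
          rw [this, pvFilter_ofrom cs w _ f (by omega), hhead, hfnat]
          simp [hfc]
        · -- the occurrence is strictly later: position c itself does not match
          have hoc : pvOcc cs w (c : Int) = false := by
            rw [Bool.eq_false_iff, Ne, pvOcc_iff]
            intro h
            exact hmin c le_rfl (by omega) (by simpa using h)
          have hsame : pvOFrom cs w ((c + 1 : Nat) : Int) = pvOFrom cs w (c : Int) := by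
            rw [pvOFrom_cons cs w (c : Int) hclI, hoc, hc1]
            simp
          rw [hsame, hhead, List.filter_cons]
          have : (decide (some ((f.toNat : Int)) ≠ some f)) = false := by
            simp [← hfnat]
          rw [this, pvFilter_ofrom cs w _ f (by omega), ← hfnat]
          simp

-- per-key corollary from count 0
lemma pvKeyLoop0 (cs w : List Char) (hw : w ≠ []) (acc : List Int) :
    ((PySem.List.pyRange 0 (cs.length : Int) 1).foldl (findStep cs w) (acc, none)).1 =
      acc ++ pvOFrom cs w 0 := by
  have h := pvKeyLoop cs w hw cs.length 0 (by omega) (by omega) acc none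
    (by intro p _; omega)
  rw [pvFilter_triv none (pvOFrom cs w ((0 : Nat) : Int)) (by intro x _; simp)] at h
  simpa using h

lemma pvKeysNonnil : ∀ k ∈ pvDictKeys, k.toList ≠ [] := by decide

lemma pvKeysNodup : pvDictKeys.Nodup := by decide

lemma pvKEYS_eq : pvKEYS = pvDictKeys := rfl

lemma pvOuterFold (cs : List Char) :
    ∀ (ks : List String), (∀ k ∈ ks, k.toList ≠ []) → ∀ (start : List Int),
      ks.foldl (fun index num =>
        ((PySem.List.pyRange 0 (cs.length : Int) 1).foldl (findStep cs num.toList)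
          (index, (none : Option Int))).1) start
      = start ++ ks.flatMap (fun k => pvOFrom cs k.toList 0) := by
  intro ks
  induction ks with
  | nil => simp
  | cons k t ih =>
    intro hne start
    rw [List.foldl_cons, pvKeyLoop0 cs k.toList (hne k List.mem_cons_self) start,
        ih (fun k' h => hne k' (List.mem_cons_of_mem k h)) _]
    simp [pvOFrom]

-- ===== VERDICT (by name: the statement is the Claim_ definition above) =====
theorem find_spec : Claim_equal_find := by
  intro line _
  unfold Spec_find find find_alt
  simp only [PySem.Str.len_eq]
  rw [pvOuterFold line.toList pvDictKeys pvKeysNonnil []]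
  apply PySem.List.sorted_eq_of_perm_of_pairwise_lt
  · have h := pvFlatMapPerm line.toList
      (PySem.List.pyRange 0 (line.toList.length : Int) 1) pvDictKeys pvKeysNodup
      (fun x _ => pvDisjoint line.toList x)
    rw [pvKEYS_eq]
    simpa [pvOFrom, pvOcc] using h
  · exact (PySem.List.pairwise_lt_pyRange_one 0 (line.toList.length : Int)).filter _
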